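-- pv_equiv track=rewrite | github.com/ThaHobbyist/Assignments | 7th_Sem/CSS752_Modelling_and_Sim_Lab/Lab_4&5/modi.py | checkOptimal
-- ===== SOURCE A (Python) =====
-- def checkOptimal(table_ij):
--     m = 9999
--
--     for row in table_ij:
--         for elem in row:
--             if elem != 0:
--                 m = min(m, elem)
--     res = 0
--     if m > 0:
--         res = 1 # optimal
--     elif m >= 0:
--         res = 2 # optimal but other solutions exist
--     else:
--         res = 3 # not optimal
--
--     return res
-- ===== SOURCE B (Python) =====
-- def checkOptimal(table_ij):
--     found = any(elem < 0 for row in table_ij for elem in row)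
--     return 3 if found else 1
-- ===== Notes on version B (the rewrite author's own statement) =====
-- stated objective: simpler
-- what changed: Replaces the full min-over-nonzero reduction (whose res=2 branch is unreachable since m never becomes 0) with a short-circuiting existence check for a negative element: return 3 if any element is < 0, else 1.
import Mathlib
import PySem

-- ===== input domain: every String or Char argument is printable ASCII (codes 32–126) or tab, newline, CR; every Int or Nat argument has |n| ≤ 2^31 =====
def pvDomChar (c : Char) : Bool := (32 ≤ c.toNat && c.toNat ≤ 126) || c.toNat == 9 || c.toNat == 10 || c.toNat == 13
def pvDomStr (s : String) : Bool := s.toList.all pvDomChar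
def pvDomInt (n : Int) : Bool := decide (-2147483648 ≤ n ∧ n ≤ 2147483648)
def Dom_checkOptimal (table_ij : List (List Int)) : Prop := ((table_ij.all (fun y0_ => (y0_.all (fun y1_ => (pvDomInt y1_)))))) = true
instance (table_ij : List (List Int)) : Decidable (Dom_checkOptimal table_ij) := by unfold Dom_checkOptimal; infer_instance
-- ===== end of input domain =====

-- B replaces A's min-over-nonzero-elements reduction (whose res=2 branch is unreachable)
-- by a short-circuiting check for a negative element: simpler and plainer.

-- ===== PORT A =====
def checkOptimal (table_ij : List (List Int)) : Int :=
  let m : Int :=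
    table_ij.foldl
      (fun m row => row.foldl (fun m elem => if elem ≠ 0 then min m elem else m) m) 9999
  if m > 0 then 1
  else if m ≥ 0 then 2
  else 3

-- ===== PORT B =====
def checkOptimal_alt (table_ij : List (List Int)) : Int :=
  let found := table_ij.any (fun row => row.any (fun elem => elem < 0))
  if found then 3 else 1

-- ===== PRECONDITION & SPEC =====
def Spec_checkOptimal (table_ij : List (List Int)) (out : Int) : Prop := out = checkOptimal_alt table_ij
instance (table_ij : List (List Int)) (out : Int) : Decidable (Spec_checkOptimal table_ij out) := by unfold Spec_checkOptimal; infer_instance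

-- ===== CLAIM (what is proved, stated in full; the proofs are below) =====
def Claim_equal_checkOptimal : Prop := ∀ (table_ij : List (List Int)), Dom_checkOptimal table_ij → Spec_checkOptimal table_ij (checkOptimal table_ij)

-- ===== LEMMAS AND PROOFS =====

theorem pv_inner_le (row : List Int) (m : Int) :
    row.foldl (fun m elem => if elem ≠ 0 then min m elem else m) m ≤ m := by
  induction row generalizing m with
  | nil => simp
  | cons e row ih =>
    simp only [List.foldl_cons]
    refine le_trans (ih _) ?_
    by_cases h : e = 0 <;> simp [h]

theorem pv_inner_neg (row : List Int) (m : Int) (hm : m < 0) :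
    row.foldl (fun m elem => if elem ≠ 0 then min m elem else m) m < 0 :=
  lt_of_le_of_lt (pv_inner_le row m) hm

theorem pv_outer_neg (t : List (List Int)) (m : Int) (hm : m < 0) :
    t.foldl (fun m row => row.foldl (fun m elem => if elem ≠ 0 then min m elem else m) m) m < 0 := by
  induction t generalizing m with
  | nil => simpa
  | cons row t ih => exact ih _ (pv_inner_neg row m hm)

theorem pv_inner_cases (row : List Int) (m : Int) (hm : 0 < m) :
    (row.any (fun e => decide (e < 0)) = true ∧
        row.foldl (fun m elem => if elem ≠ 0 then min m elem else m) m < 0) ∨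
    (row.any (fun e => decide (e < 0)) = false ∧
        0 < row.foldl (fun m elem => if elem ≠ 0 then min m elem else m) m) := by
  induction row generalizing m with
  | nil => right; simpa
  | cons a row ih =>
    simp only [List.foldl_cons, List.any_cons]
    by_cases ha : a < 0
    · left
      constructor
      · simp [ha]
      · apply pv_inner_neg
        have h0 : a ≠ 0 := by omega
        simp [h0]; omega
    · have hm' : 0 < (if a ≠ 0 then min m a else m) := by
        by_cases h0 : a = 0 <;> simp [h0] <;> omega
      rcases ih _ hm' with ⟨h1, h2⟩ | ⟨h1, h2⟩
      · left; exact ⟨by simp [h1], h2⟩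
      · right; exact ⟨by simp [ha, h1], h2⟩

theorem pv_outer_cases (t : List (List Int)) (m : Int) (hm : 0 < m) :
    (t.any (fun row => row.any (fun e => decide (e < 0))) = true ∧
        t.foldl (fun m row => row.foldl (fun m elem => if elem ≠ 0 then min m elem else m) m) m < 0) ∨
    (t.any (fun row => row.any (fun e => decide (e < 0))) = false ∧
        0 < t.foldl (fun m row => row.foldl (fun m elem => if elem ≠ 0 then min m elem else m) m) m) := by
  induction t generalizing m with
  | nil => right; simpa
  | cons row t ih =>
    simp only [List.foldl_cons, List.any_cons]
    rcases pv_inner_cases row m hm with ⟨h1, h2⟩ | ⟨h1, h2⟩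
    · left
      exact ⟨by simp [h1], pv_outer_neg t _ h2⟩
    · rcases ih _ h2 with ⟨g1, g2⟩ | ⟨g1, g2⟩
      · left; exact ⟨by simp [g1], g2⟩
      · right; exact ⟨by simp [h1, g1], g2⟩

-- ===== VERDICT (by name: the statement is the Claim_ definition above) =====
theorem checkOptimal_spec : Claim_equal_checkOptimal := by
  intro t _
  unfold Spec_checkOptimal checkOptimal checkOptimal_alt
  rcases pv_outer_cases t 9999 (by norm_num) with ⟨h1, h2⟩ | ⟨h1, h2⟩ <;>
    simp only [h1] <;> split_ifs <;> simp_all <;> omega
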